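-- pv_equiv track=rewrite | github.com/kroll42/transmissao | teste.py | biphase_space_encode
-- ===== SOURCE A (Python) =====
-- from typing import List, Tuple, Dict, Callable
--
-- def biphase_space_encode(binary_data: List[int]) -> List[int]:
--     """
--     Codificação Biphase Space:
--     - Sempre há uma transição no meio do intervalo do bit
--     - Bit 0 tem uma transição adicional no início do intervalo
--     - Bit 1 não tem transição adicional
--     """
--     encoded = []
--     level = 0
--
--     for bit in binary_data:
--         if bit == 0:
--             # Transição no início
--             level = 1 - level
--
--         encoded.append(level)
--
--         # Transição no meio (para ambos 0 e 1)
--         level = 1 - level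
--         encoded.append(level)
--
--     return encoded
-- ===== SOURCE B (Python) =====
-- from typing import List
--
-- def biphase_space_encode(binary_data: List[int]) -> List[int]:
--     # Closed-form characterization: the pair emitted for bit i is always
--     # (1 - q, q), where q is the parity of non-zero bits among bits 0..i
--     # (a 0-bit's two toggles cancel, a non-zero bit flips the level once).
--     # Stage 1: running-parity scan; Stage 2: flatten each parity into its pair.
--     qs = []
--     q = 0
--     for b in binary_data:
--         if b != 0:
--             q = 1 - q
--         qs.append(q)
--     return [v for q in qs for v in (1 - q, q)]
-- ===== Notes on version B (the rewrite author's own statement) =====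
-- stated objective: alternative
-- what changed: B replaces A's interleaved double-toggle simulation with a closed-form characterization: each bit's pair is (1-q, q) where q is the running parity of non-zero bits, computed in a separate parity scan and then flattened, with no branch at emission.
import Mathlib
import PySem

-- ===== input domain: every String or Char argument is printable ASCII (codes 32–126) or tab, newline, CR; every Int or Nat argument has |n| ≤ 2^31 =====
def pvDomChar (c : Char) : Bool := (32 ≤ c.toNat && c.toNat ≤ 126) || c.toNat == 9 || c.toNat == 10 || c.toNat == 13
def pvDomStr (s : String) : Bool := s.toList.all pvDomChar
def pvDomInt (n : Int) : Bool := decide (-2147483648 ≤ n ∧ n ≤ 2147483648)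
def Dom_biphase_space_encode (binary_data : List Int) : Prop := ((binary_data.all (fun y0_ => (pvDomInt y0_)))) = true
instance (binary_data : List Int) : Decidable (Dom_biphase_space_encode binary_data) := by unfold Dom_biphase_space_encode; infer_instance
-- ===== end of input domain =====

-- B derives each pair from the running parity of non-zero bits (closed form (1-q, q)),
-- in two staged passes instead of A's interleaved double-toggle simulation; same values, same cost.

-- ===== PORT A =====
-- A: simulate the toggling level, appending before and after the mid-transition.
def biphase_space_encode (binary_data : List Int) : List Int :=
  (binary_data.foldl (fun (s : List Int × Int) bit =>
    let level := if bit = 0 then 1 - s.2 else s.2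
    let encoded := s.1 ++ [level]
    let level2 := 1 - level
    (encoded ++ [level2], level2)) ([], 0)).1

-- ===== PORT B =====
-- B stage 1: running parity q of non-zero bits, one entry per input bit.
def biphaseParities (q : Int) : List Int → List Int
  | [] => []
  | b :: rest =>
    let q' := if b ≠ 0 then 1 - q else q
    q' :: biphaseParities q' rest

-- B stage 2: flatten each parity into its pair (1 - q, q).
def biphase_space_encode_alt (binary_data : List Int) : List Int :=
  (biphaseParities 0 binary_data).flatMap (fun q => [1 - q, q])

-- ===== PRECONDITION & SPEC =====
def Spec_biphase_space_encode (binary_data : List Int) (out : List Int) : Prop := out = biphase_space_encode_alt binary_data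
instance (binary_data : List Int) (out : List Int) : Decidable (Spec_biphase_space_encode binary_data out) := by unfold Spec_biphase_space_encode; infer_instance

-- ===== CLAIM (what is proved, stated in full; the proofs are below) =====
def Claim_equal_biphase_space_encode : Prop := ∀ (binary_data : List Int), Dom_biphase_space_encode binary_data → Spec_biphase_space_encode binary_data (biphase_space_encode binary_data)

-- ===== LEMMAS AND PROOFS =====
def stepA (s : List Int × Int) (bit : Int) : List Int × Int :=
  let lv := if bit = 0 then 1 - s.2 else s.2
  (s.1 ++ [lv] ++ [1 - lv], 1 - lv)

-- Invariant: A's fold from (acc, level) appends exactly B's pairs for the parities from level.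
lemma biphase_fold_eq (l : List Int) : ∀ (acc : List Int) (level : Int),
    (l.foldl stepA (acc, level)).1
      = acc ++ (biphaseParities level l).flatMap (fun q => [1 - q, q]) := by
  induction l with
  | nil => intro acc level; simp [biphaseParities]
  | cons bit rest ih =>
    intro acc level
    rw [List.foldl_cons]
    by_cases h : bit = 0
    · have h2 : (1 : Int) - (1 - level) = level := by ring
      have key : stepA (acc, level) bit = (acc ++ [1 - level, level], level) := by
        simp [stepA, h, h2]
      rw [key, ih]
      simp [biphaseParities, h, h2]
    · have key : stepA (acc, level) bit = (acc ++ [level, 1 - level], 1 - level) := by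
        simp [stepA, h]
      rw [key, ih]
      have h2 : (1 : Int) - (1 - level) = level := by ring
      simp [biphaseParities, h, h2]

-- ===== VERDICT (by name: the statement is the Claim_ definition above) =====
theorem biphase_space_encode_spec : Claim_equal_biphase_space_encode := by
  intro l _
  show biphase_space_encode l = biphase_space_encode_alt l
  exact biphase_fold_eq l [] 0
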